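-- pv_equiv track=rewrite | github.com/BoJakobsen/AoC2024 | Snippets.py | maptodict
-- ===== SOURCE A (Python) =====
-- def maptodict(lines, basechar):
--     pos = {}
--     for ll in range(len(lines)):
--         for cc in range(len(lines[ll])):
--             char = lines[ll][cc]
--             if char not in basechar:
--                 if char in pos:
--                     pos[char].add(((ll, cc)))
--                 else:
--                     pos[char] = set()
--                     pos[char].add((ll, cc))
--     return pos
-- ===== SOURCE B (Python) =====
-- def maptodict(lines, basechar):
--     cells = [(ch, (ll, cc))
--              for ll, line in enumerate(lines)
--              for cc, ch in enumerate(line)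
--              if ch not in basechar]
--     keys = list(dict.fromkeys(ch for ch, _ in cells))
--     return {k: {p for c, p in cells if c == k} for k in keys}
-- ===== Notes on version B (the rewrite author's own statement) =====
-- stated objective: alternative
-- what changed: A builds the dict of sets in one nested index loop with per-char membership branching; B first flattens the grid into a filtered (char, position) list, takes the ordered distinct chars, and builds each set by a per-key comprehension over that list.
import Mathlib
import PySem

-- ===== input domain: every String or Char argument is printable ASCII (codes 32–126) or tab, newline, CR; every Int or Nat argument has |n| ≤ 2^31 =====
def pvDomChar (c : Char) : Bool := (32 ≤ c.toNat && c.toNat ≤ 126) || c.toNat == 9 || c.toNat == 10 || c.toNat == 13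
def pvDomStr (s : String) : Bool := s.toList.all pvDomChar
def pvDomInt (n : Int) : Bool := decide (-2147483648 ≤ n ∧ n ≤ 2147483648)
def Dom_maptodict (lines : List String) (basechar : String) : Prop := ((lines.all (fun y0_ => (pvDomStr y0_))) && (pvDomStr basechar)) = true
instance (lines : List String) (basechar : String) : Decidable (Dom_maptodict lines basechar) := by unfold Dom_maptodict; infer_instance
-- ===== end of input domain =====

-- B re-decomposes A's single nested index loop into: flatten the grid to a filtered
-- (char, position) list, dedup the chars in first-occurrence order, then build each
-- key's set by a per-key pass over that list (objective: alternative, not faster).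

-- ===== PORT A =====
-- literal transliteration of A: dict built by a nested index loop with a membership branch
def maptodict (lines : List String) (basechar : String) : List (String × List (Int × Int)) :=
  ((PySem.List.pyRange 0 (PySem.List.len lines)).foldl (fun pos ll =>
      let line := (PySem.List.pyGetD lines ll "").toList
      (PySem.List.pyRange 0 (PySem.List.len line)).foldl (fun pos cc =>
        let char := PySem.List.pyGetD line cc ' '
        if !(PySem.Chars.isIn [char] basechar.toList) then
          if pos.contains (String.ofList [char]) then
            pos.insert (String.ofList [char])
              (PySem.Set.add (pos.getD (String.ofList [char]) PySem.Set.empty) (ll, cc))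
          else
            -- pos[char] = set(); pos[char].add((ll, cc))
            (pos.insert (String.ofList [char]) PySem.Set.empty).insert (String.ofList [char])
              (PySem.Set.add ((pos.insert (String.ofList [char]) PySem.Set.empty).getD
                  (String.ofList [char]) PySem.Set.empty) (ll, cc))
        else pos) pos)
    PySem.Dict.empty).items

-- ===== PORT B =====
-- one line of the flat comprehension: cells of this row whose char is not in basechar
def pvCellsLine (basechar : String) (ll : Int) (line : List Char) : List (String × (Int × Int)) :=
  ((PySem.List.enumerate line).filter
      (fun p => !(PySem.Chars.isIn [p.2] basechar.toList))).map
    (fun p => (String.ofList [p.2], (ll, p.1)))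

-- cells = [(ch, (ll, cc)) for ll, line in enumerate(lines) for cc, ch in enumerate(line) if ch not in basechar]
def pvCells (lines : List String) (basechar : String) : List (String × (Int × Int)) :=
  (PySem.List.enumerate lines).flatMap (fun q => pvCellsLine basechar q.1 q.2.toList)

def maptodict_alt (lines : List String) (basechar : String) : List (String × List (Int × Int)) :=
  let cells := pvCells lines basechar
  let keys := PySem.List.dedup (cells.map (fun c => c.1))
  (keys.foldl (fun d k =>
      d.insert k (PySem.Set.ofList ((cells.filter (fun c => c.1 == k)).map (fun c => c.2))))
    PySem.Dict.empty).items

-- ===== PRECONDITION & SPEC =====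
def Spec_maptodict (lines : List String) (basechar : String) (out : List (String × List (Int × Int))) : Prop := out = maptodict_alt lines basechar
instance (lines : List String) (basechar : String) (out : List (String × List (Int × Int))) : Decidable (Spec_maptodict lines basechar out) := by unfold Spec_maptodict; infer_instance

-- ===== CLAIM (what is proved, stated in full; the proofs are below) =====
def Claim_equal_maptodict : Prop := ∀ (lines : List String) (basechar : String), Dom_maptodict lines basechar → Spec_maptodict lines basechar (maptodict lines basechar)

-- ===== LEMMAS AND PROOFS =====

-- A's dict update step (either branch) is a single modify
def pvStep (d : PySem.Dict String (PySem.Set (Int × Int))) (c : String × (Int × Int)) :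
    PySem.Dict String (PySem.Set (Int × Int)) :=
  d.modify c.1 PySem.Set.empty (fun s => PySem.Set.add s c.2)

theorem pv_foldl_flatMap {α β δ : Type} (l : List α) (g : α → List β) (f : δ → β → δ)
    (init : δ) :
    l.foldl (fun acc x => (g x).foldl f acc) init = (l.flatMap g).foldl f init := by
  induction l generalizing init with
  | nil => rfl
  | cons x xs ih => simp [List.flatMap_cons, List.foldl_append, ih]

theorem pv_stepA_eq (d : PySem.Dict String (PySem.Set (Int × Int))) (k : String)
    (p : Int × Int) :
    (if d.contains k then d.insert k (PySem.Set.add (d.getD k PySem.Set.empty) p)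
     else (d.insert k PySem.Set.empty).insert k
        (PySem.Set.add ((d.insert k PySem.Set.empty).getD k PySem.Set.empty) p))
    = pvStep d (k, p) := by
  by_cases h : d.contains k
  · simp [h, pvStep, PySem.Dict.modify]
  · simp only [Bool.not_eq_true] at h
    simp only [h, Bool.false_eq_true, if_false, PySem.Dict.getD_insert_self, pvStep,
      PySem.Dict.modify, PySem.Dict.getD_of_not_contains d PySem.Set.empty h]
    apply PySem.Dict.ext
    rw [PySem.Dict.items_insert_of_contains (d.insert k PySem.Set.empty) _
        (by simp [PySem.Dict.contains_insert_self]),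
      PySem.Dict.items_insert_of_not_contains d _ h,
      PySem.Dict.items_insert_of_not_contains d _ h]
    rw [List.map_append]
    have hmap : d.items.map (fun q => if q.1 == k then (k, PySem.Set.add PySem.Set.empty p) else q)
        = d.items := by
      conv_rhs => rw [← List.map_id d.items]
      apply List.map_congr_left
      intro q hq
      have hq1 : (q.1 == k) = false := by
        by_contra hc
        simp only [Bool.not_eq_false, beq_iff_eq] at hc
        have : d.contains k = true := by
          rw [PySem.Dict.contains_iff_mem_keys]
          exact hc ▸ PySem.Dict.mem_keys_of_mem_items d hq
        simp [this] at h
      simp [hq1]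
    rw [hmap]
    simp

theorem pv_inner_eq (basechar : String) (ll : Int) (line : List Char)
    (pos : PySem.Dict String (PySem.Set (Int × Int))) :
    (PySem.List.pyRange 0 (PySem.List.len line)).foldl (fun pos cc =>
        let char := PySem.List.pyGetD line cc ' '
        if !(PySem.Chars.isIn [char] basechar.toList) then
          if pos.contains (String.ofList [char]) then
            pos.insert (String.ofList [char])
              (PySem.Set.add (pos.getD (String.ofList [char]) PySem.Set.empty) (ll, cc))
          else
            (pos.insert (String.ofList [char]) PySem.Set.empty).insert (String.ofList [char])
              (PySem.Set.add ((pos.insert (String.ofList [char]) PySem.Set.empty).getD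
                  (String.ofList [char]) PySem.Set.empty) (ll, cc))
        else pos) pos
    = (pvCellsLine basechar ll line).foldl pvStep pos := by
  unfold pvCellsLine
  rw [PySem.List.enumerate_eq_map_pyRange line ' ', List.filter_map, List.map_map,
    List.foldl_map, ← PySem.List.foldl_if_eq_foldl_filter]
  apply PySem.List.foldl_congr_mem
  intro acc x _
  simp only [Function.comp]
  by_cases hb : PySem.Chars.isIn [PySem.List.pyGetD line x ' '] basechar.toList
  · simp [hb]
  · simp only [hb, Bool.not_false, if_true]
    exact pv_stepA_eq acc (String.ofList [PySem.List.pyGetD line x ' ']) (ll, x)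

theorem pv_A_norm (lines : List String) (basechar : String) :
    maptodict lines basechar
      = ((pvCells lines basechar).foldl pvStep PySem.Dict.empty).items := by
  unfold maptodict pvCells
  rw [← pv_foldl_flatMap]
  rw [PySem.List.enumerate_eq_map_pyRange lines "", List.foldl_map]
  congr 2
  funext pos ll
  exact pv_inner_eq basechar ll (PySem.List.pyGetD lines ll "").toList pos

theorem pv_getD_fold (cells : List (String × (Int × Int)))
    (d : PySem.Dict String (PySem.Set (Int × Int))) (k : String) :
    (cells.foldl pvStep d).getD k PySem.Set.empty
      = PySem.Set.update (d.getD k PySem.Set.empty)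
          ((cells.filter (fun c => c.1 == k)).map (fun c => c.2)) := by
  induction cells generalizing d with
  | nil => simp [PySem.Set.update]
  | cons c cs ih =>
    simp only [List.foldl_cons, ih, List.filter_cons]
    by_cases h : c.1 = k
    · simp [pvStep, PySem.Dict.getD_modify, h, PySem.Set.update_cons]
    · have hb : (c.1 == k) = false := by simp [h]
      simp [pvStep, PySem.Dict.getD_modify, hb, (Ne.symm h : ¬ k = c.1)]

theorem pv_items_A (cells : List (String × (Int × Int))) :
    ((cells.foldl pvStep PySem.Dict.empty).items)
      = (PySem.List.dedup (cells.map (fun c => c.1))).map (fun k =>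
          (k, PySem.Set.ofList ((cells.filter (fun c => c.1 == k)).map (fun c => c.2)))) := by
  have hkeys : (cells.foldl pvStep PySem.Dict.empty).keys
      = PySem.List.dedup (cells.map (fun c => c.1)) := by
    have := PySem.Dict.keys_foldl_modify_key cells (fun c => c.1) PySem.Set.empty
      (fun _ c => fun s => PySem.Set.add s c.2) PySem.Dict.empty
    simpa [pvStep, PySem.Dict.keys_empty, PySem.Set.update_nil_left, PySem.List.dedup] using this
  have hnd : (cells.foldl pvStep PySem.Dict.empty).keys.Nodup := by
    exact PySem.Dict.nodup_keys_foldl_modify_key cells (fun c => c.1) PySem.Set.empty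
      (fun _ c => fun s => PySem.Set.add s c.2) PySem.Dict.empty PySem.Dict.nodup_keys_empty
  rw [PySem.Dict.items_eq_map_keys _ hnd PySem.Set.empty, hkeys]
  apply List.map_congr_left
  intro k _
  rw [pv_getD_fold]
  simp [PySem.Dict.getD_empty, PySem.Set.update_nil_left, PySem.Set.empty]

theorem pv_items_B (lines : List String) (basechar : String) :
    maptodict_alt lines basechar
      = (PySem.List.dedup ((pvCells lines basechar).map (fun c => c.1))).map (fun k =>
          (k, PySem.Set.ofList (((pvCells lines basechar).filter
              (fun c => c.1 == k)).map (fun c => c.2)))) := by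
  unfold maptodict_alt
  have h := PySem.Dict.items_foldl_insert_fresh
    (PySem.List.dedup ((pvCells lines basechar).map (fun c => c.1)))
    (fun k => k)
    (fun k => PySem.Set.ofList (((pvCells lines basechar).filter
        (fun c => c.1 == k)).map (fun c => c.2)))
    PySem.Dict.empty
    (fun a _ => PySem.Dict.contains_empty a)
    (by simpa [PySem.List.dedup] using PySem.Set.nodup_ofList ((pvCells lines basechar).map (fun c => c.1)))
  simpa using h

-- ===== VERDICT (by name: the statement is the Claim_ definition above) =====
theorem maptodict_spec : Claim_equal_maptodict := by
  intro lines basechar _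
  show maptodict lines basechar = maptodict_alt lines basechar
  rw [pv_A_norm, pv_items_A, pv_items_B]
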